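-- pv_equiv track=rewrite | github.com/ishayyemini/CS1001 | ex4/hw4_322868852.py | can_create_twice
-- ===== SOURCE A (Python) =====
-- def can_create_twice(s, L):
--     if len(L) <= 1:
--         return (L[0] if L else 0) == abs(s)
--
--     return (
--         can_create_twice(s, L[1:])
--         or can_create_twice(s - L[0], L[1:])
--         or can_create_twice(s + L[0], L[1:])
--         or can_create_twice(s - (2 * L[0]), L[1:])
--         or can_create_twice(s + (2 * L[0]), L[1:])
--     )
-- ===== SOURCE B (Python) =====
-- def can_create_twice(s, L):
--     if not L:
--         return s == 0
--     n = len(L)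
--     if n == 1:
--         return L[0] == abs(s)
--     failed = [set() for _ in range(n)]
--     def go(i, t):
--         x = L[i]
--         if i == n - 2:
--             last = L[i + 1]
--             return (last == abs(t) or last == abs(t - x) or last == abs(t + x)
--                     or last == abs(t - 2 * x) or last == abs(t + 2 * x))
--         if t in failed[i]:
--             return False
--         for k in (0, -1, 1, -2, 2):
--             if go(i + 1, t + k * x):
--                 return True
--         failed[i].add(t)
--         return False
--     return go(0, s)
-- ===== Notes on version B (the rewrite author's own statement) =====
-- stated objective: alternative
-- what changed: Replaced A's list-slicing 5-way or-chain recursion by an index-based DFS that memoizes failed (index, partial-sum) states in per-level sets and inlines the last level, avoiding re-exploration of repeated states.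
import Mathlib
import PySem

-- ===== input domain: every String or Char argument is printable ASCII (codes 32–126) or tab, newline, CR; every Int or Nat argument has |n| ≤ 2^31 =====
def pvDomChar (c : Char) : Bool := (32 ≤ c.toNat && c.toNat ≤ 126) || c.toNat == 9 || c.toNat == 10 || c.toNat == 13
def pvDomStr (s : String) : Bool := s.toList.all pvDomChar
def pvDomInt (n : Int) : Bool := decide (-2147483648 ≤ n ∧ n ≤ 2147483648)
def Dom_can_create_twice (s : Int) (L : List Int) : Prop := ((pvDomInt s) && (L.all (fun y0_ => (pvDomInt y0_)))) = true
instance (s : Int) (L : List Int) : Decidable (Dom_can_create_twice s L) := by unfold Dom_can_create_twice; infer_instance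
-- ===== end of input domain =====

-- B replaces A's slice-and-branch recursion by an index-based DFS with per-level failure memo sets (a different algorithm; it prunes repeated states).

-- ===== PORT A =====
def can_create_twice : Int → List Int → Bool
  | s, [] => decide ((0 : Int) = |s|)
  | s, [a] => decide (a = |s|)
  | s, a :: b :: rest =>
    can_create_twice s (b :: rest) ||
    can_create_twice (s - a) (b :: rest) ||
    can_create_twice (s + a) (b :: rest) ||
    can_create_twice (s - 2 * a) (b :: rest) ||
    can_create_twice (s + 2 * a) (b :: rest)

-- ===== PORT B =====
-- go(i, t) of Source B; Python's loop index i is carried together with the structural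
-- fuel d = (n-2) - i (go recurses from i to i+1 and bottoms out at i = n-2, so d
-- counts exactly the remaining recursion depth); `failed` is the list of per-level sets.
-- L[i] under 0 ≤ i < n is ported as L.getD i 0 (exact there).
def altGo (L : List Int) : Nat → Nat → Int → List (PySem.Set Int) → Bool × List (PySem.Set Int)
  | 0, i, t, failed =>
    -- i == n - 2: inlined last level
    let x := L.getD i 0
    let last := L.getD (i + 1) 0
    (decide (last = |t|) || decide (last = |t - x|) || decide (last = |t + x|) ||
       decide (last = |t - 2 * x|) || decide (last = |t + 2 * x|), failed)
  | d + 1, i, t, failed =>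
    let x := L.getD i 0
    if (failed.getD i PySem.Set.empty).contains t then (false, failed)
    else
      let r := ([0, -1, 1, -2, 2] : List Int).foldl
        (fun acc k => if acc.1 then acc else altGo L d (i + 1) (t + k * x) acc.2)
        (false, failed)
      if r.1 then (true, r.2)
      else (false, r.2.set i (PySem.Set.add (r.2.getD i PySem.Set.empty) t))

def can_create_twice_alt (s : Int) (L : List Int) : Bool :=
  if L.isEmpty then decide (s = 0)
  else if L.length = 1 then decide (L.getD 0 0 = |s|)
  else (altGo L (L.length - 2) 0 s (List.replicate L.length PySem.Set.empty)).1

-- ===== PRECONDITION & SPEC =====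
def Spec_can_create_twice (s : Int) (L : List Int) (out : Bool) : Prop := out = can_create_twice_alt s L
instance (s : Int) (L : List Int) (out : Bool) : Decidable (Spec_can_create_twice s L out) := by unfold Spec_can_create_twice; infer_instance

-- ===== CLAIM (what is proved, stated in full; the proofs are below) =====
def Claim_equal_can_create_twice : Prop := ∀ (s : Int) (L : List Int), Dom_can_create_twice s L → Spec_can_create_twice s L (can_create_twice s L)

-- ===== LEMMAS AND PROOFS =====

-- the failure-memo invariant: every recorded (level, sum) really is a failing state of A
def MemoInv (L : List Int) (failed : List (PySem.Set Int)) : Prop :=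
  failed.length = L.length ∧
  ∀ i t, t ∈ failed.getD i PySem.Set.empty → can_create_twice t (L.drop i) = false

lemma A_two (t a b : Int) (rest : List Int) :
    can_create_twice t (a :: b :: rest) =
      (can_create_twice t (b :: rest) ||
       can_create_twice (t - a) (b :: rest) ||
       can_create_twice (t + a) (b :: rest) ||
       can_create_twice (t - 2 * a) (b :: rest) ||
       can_create_twice (t + 2 * a) (b :: rest)) := rfl

lemma memoInv_set (L : List Int) (failed : List (PySem.Set Int)) (i : Nat) (t : Int)
    (hInv : MemoInv L failed) (hA : can_create_twice t (L.drop i) = false) :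
    MemoInv L (failed.set i (PySem.Set.add (failed.getD i PySem.Set.empty) t)) := by
  obtain ⟨hlen, hmem⟩ := hInv
  refine ⟨by simpa using hlen, ?_⟩
  intro j u hu
  by_cases hij : j = i
  · subst hij
    by_cases hj : j < failed.length
    · rw [List.getD_eq_getElem _ _ (by simpa using hj), List.getElem_set_self] at hu
      rw [PySem.Set.mem_add] at hu
      rcases hu with hu | hu
      · exact hmem j u hu
      · subst hu; exact hA
    · rw [List.getD_eq_default _ _ (by simpa using Nat.le_of_not_lt hj)] at hu
      simp [PySem.Set.empty] at hu
  · rw [show (failed.set i (PySem.Set.add (failed.getD i PySem.Set.empty) t)).getD j PySem.Set.empty = failed.getD j PySem.Set.empty by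
        simp [List.getD_eq_getElem?_getD, List.getElem?_set_ne (Ne.symm hij)]] at hu
    exact hmem j u hu

lemma altGo_correct (L : List Int) : ∀ (d i : Nat) (t : Int) (failed : List (PySem.Set Int)),
    d + i + 2 = L.length → MemoInv L failed →
    (altGo L d i t failed).1 = can_create_twice t (L.drop i) ∧
      MemoInv L (altGo L d i t failed).2 := by
  intro d
  induction d with
  | zero =>
    intro i t failed hdi hInv
    have hi : i < L.length := by omega
    have hi1 : i + 1 < L.length := by omega
    have hdrop : L.drop i = L[i] :: L[i+1] :: L.drop (i + 2) := by
      rw [List.drop_eq_getElem_cons hi, List.drop_eq_getElem_cons hi1]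
    have hdrop2 : L.drop (i + 2) = [] := by
      apply List.drop_eq_nil_of_le; omega
    refine ⟨?_, hInv⟩
    rw [hdrop, hdrop2, A_two]
    simp only [altGo, List.getD_eq_getElem _ _ hi, List.getD_eq_getElem _ _ hi1]
    simp [can_create_twice]
  | succ d ih =>
    intro i t failed hdi hInv
    have hi : i < L.length := by omega
    have hi1 : i + 1 < L.length := by omega
    have hdrop : L.drop i = L[i] :: L[i+1] :: L.drop (i + 2) := by
      rw [List.drop_eq_getElem_cons hi, List.drop_eq_getElem_cons hi1]
    have hdrop1 : L.drop (i + 1) = L[i+1] :: L.drop (i + 2) := by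
      rw [List.drop_eq_getElem_cons hi1]
    simp only [altGo]
    rw [List.getD_eq_getElem _ _ hi]
    by_cases hmem : (failed.getD i PySem.Set.empty).contains t
    · rw [if_pos hmem]
      refine ⟨?_, hInv⟩
      rw [PySem.Set.contains_iff] at hmem
      exact (hInv.2 i t hmem).symm
    · rw [if_neg hmem]
      -- the short-circuited coefficient loop
      have fold_correct : ∀ (ks : List Int) (acc : Bool × List (PySem.Set Int)),
          MemoInv L acc.2 →
          (ks.foldl (fun acc k => if acc.1 then acc else altGo L d (i + 1) (t + k * L[i]) acc.2) acc).1
            = (acc.1 || ks.any (fun k => can_create_twice (t + k * L[i]) (L.drop (i + 1)))) ∧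
          MemoInv L (ks.foldl (fun acc k => if acc.1 then acc else altGo L d (i + 1) (t + k * L[i]) acc.2) acc).2 := by
        intro ks
        induction ks with
        | nil => intro acc hacc; exact ⟨by simp, hacc⟩
        | cons k ks ihk =>
          intro acc hacc
          simp only [List.foldl_cons, List.any_cons]
          by_cases h1 : acc.1
          · rw [if_pos h1]
            obtain ⟨hv, hinv⟩ := ihk acc hacc
            rw [hv, h1]
            simp
            exact hinv
          · rw [if_neg h1]
            have hrec := ih (i + 1) (t + k * L[i]) acc.2 (by omega) hacc
            obtain ⟨hv, hinv⟩ := ihk (altGo L d (i + 1) (t + k * L[i]) acc.2) hrec.2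
            rw [hv, hrec.1]
            simp only [Bool.not_eq_true] at h1
            rw [h1]
            simp
            exact hinv
      obtain ⟨hv, hinv⟩ := fold_correct [0, -1, 1, -2, 2] (false, failed) hInv
      set r := (([0, -1, 1, -2, 2] : List Int).foldl
        (fun acc k => if acc.1 then acc else altGo L d (i + 1) (t + k * L[i]) acc.2)
        (false, failed)) with hr
      have hval : r.1 = can_create_twice t (L.drop i) := by
        rw [hv, hdrop, A_two, ← hdrop1]
        have e0 : t + 0 * L[i] = t := by ring
        have e1 : t + (-1) * L[i] = t - L[i] := by ring
        have e2 : t + 1 * L[i] = t + L[i] := by ring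
        have e3 : t + (-2) * L[i] = t - 2 * L[i] := by ring
        simp only [List.any_cons, List.any_nil, e0, e1, e2, e3]
        cases can_create_twice t (L.drop (i+1)) <;>
        cases can_create_twice (t - L[i]) (L.drop (i+1)) <;>
        cases can_create_twice (t + L[i]) (L.drop (i+1)) <;>
        cases can_create_twice (t - 2 * L[i]) (L.drop (i+1)) <;>
        cases can_create_twice (t + 2 * L[i]) (L.drop (i+1)) <;> rfl
      by_cases hres : r.1
      · rw [if_pos hres]
        exact ⟨by rw [← hval, hres], hinv⟩
      · rw [if_neg hres]
        simp only [Bool.not_eq_true] at hres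
        refine ⟨by rw [← hval, hres], ?_⟩
        exact memoInv_set L r.2 i t hinv (by rw [← hval, hres])

-- ===== VERDICT (by name: the statement is the Claim_ definition above) =====
theorem can_create_twice_spec : Claim_equal_can_create_twice := by
  intro s L _
  unfold Spec_can_create_twice can_create_twice_alt
  match L with
  | [] =>
    simp only [can_create_twice, List.isEmpty_nil, if_true]
    have : ((0 : Int) = |s|) ↔ (s = 0) := by rw [eq_comm, abs_eq_zero]
    simp [this]
  | [a] =>
    simp [can_create_twice]
  | a :: b :: rest =>
    have hlen : 2 ≤ (a :: b :: rest).length := by simp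
    have hInv : MemoInv (a :: b :: rest) (List.replicate (a :: b :: rest).length PySem.Set.empty) := by
      refine ⟨by simp, ?_⟩
      intro i t hmem
      exfalso
      by_cases hi : i < (List.replicate (a :: b :: rest).length (PySem.Set.empty (α := Int))).length
      · rw [List.getD_eq_getElem _ _ hi, List.getElem_replicate] at hmem
        simp [PySem.Set.empty] at hmem
      · rw [List.getD_eq_default _ _ (Nat.le_of_not_lt hi)] at hmem
        simp [PySem.Set.empty] at hmem
    have h := altGo_correct (a :: b :: rest) ((a :: b :: rest).length - 2) 0 s
      (List.replicate (a :: b :: rest).length PySem.Set.empty) (by omega) hInv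
    simp only [List.isEmpty_cons, List.drop_zero] at h ⊢
    have hne : (a :: b :: rest).length ≠ 1 := by simp
    rw [if_neg (by simp)]
    rw [if_neg hne]
    exact h.1.symm
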